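-- pv_equiv track=rewrite | github.com/SSH1007/Algorithm | 프로그래머스/0/181928. 이어 붙인 수/이어 붙인 수.py | solution
-- ===== SOURCE A (Python) =====
-- def solution(num_list):
--     a, b = 0, 0
--     a_cnt, b_cnt = 1, 1
--     for i in range(len(num_list)-1, -1, -1):
--         if num_list[i]%2:
--             a += num_list[i]*a_cnt
--             a_cnt*=10
--         else:
--             b += num_list[i]*b_cnt
--             b_cnt*=10
--     answer = a+b
--     return answer
-- ===== SOURCE B (Python) =====
-- def solution(num_list):
--     # Forward single pass: Horner-style digit accumulation per parity class,
--     # instead of A's reversed index loop with explicit power-of-10 counters.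
--     a = b = 0
--     for x in num_list:
--         if x % 2:
--             a = a * 10 + x
--         else:
--             b = b * 10 + x
--     return a + b
-- ===== Notes on version B (the rewrite author's own statement) =====
-- stated objective: simpler
-- what changed: Replaces A's reversed index loop that accumulates each parity group with explicit power-of-10 counters by a single forward pass doing Horner-style accumulation (acc = acc*10 + x) per parity class, with no counters and no indexing.
import Mathlib
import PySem

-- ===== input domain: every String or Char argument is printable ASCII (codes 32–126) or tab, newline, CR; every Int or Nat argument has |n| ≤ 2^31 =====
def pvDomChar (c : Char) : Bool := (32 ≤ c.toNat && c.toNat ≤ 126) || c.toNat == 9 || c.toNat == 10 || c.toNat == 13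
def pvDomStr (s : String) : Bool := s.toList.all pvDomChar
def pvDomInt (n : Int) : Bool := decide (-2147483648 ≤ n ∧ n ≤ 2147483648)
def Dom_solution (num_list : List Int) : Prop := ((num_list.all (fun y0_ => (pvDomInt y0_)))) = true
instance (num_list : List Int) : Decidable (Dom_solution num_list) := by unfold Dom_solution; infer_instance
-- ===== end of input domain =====

-- B replaces A's reversed index loop with power-of-10 counters by a forward
-- Horner-style pass per parity class (simpler; same result, no counters).

-- ===== PORT A =====
-- state (a, b, a_cnt, b_cnt); num_list[i] is always in range for i of this loop,
-- so pyGetD with default 0 is exact here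
def solutionStepA (s : Int × Int × Int × Int) (v : Int) : Int × Int × Int × Int :=
  if PySem.Int.mod v 2 ≠ 0 then (s.1 + v * s.2.2.1, s.2.1, s.2.2.1 * 10, s.2.2.2)
  else (s.1, s.2.1 + v * s.2.2.2, s.2.2.1, s.2.2.2 * 10)

def solution (num_list : List Int) : Int :=
  let st := (PySem.List.pyRange ((num_list.length : Int) - 1) (-1) (-1)).foldl
    (fun s i => solutionStepA s (PySem.List.pyGetD num_list i 0)) (0, 0, 1, 1)
  st.1 + st.2.1

-- ===== PORT B =====
def solutionStepB (s : Int × Int) (x : Int) : Int × Int :=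
  if PySem.Int.mod x 2 ≠ 0 then (s.1 * 10 + x, s.2) else (s.1, s.2 * 10 + x)

def solution_alt (num_list : List Int) : Int :=
  let p := num_list.foldl solutionStepB (0, 0)
  p.1 + p.2

-- ===== PRECONDITION & SPEC =====
def Spec_solution (num_list : List Int) (out : Int) : Prop := out = solution_alt num_list
instance (num_list : List Int) (out : Int) : Decidable (Spec_solution num_list out) := by unfold Spec_solution; infer_instance

-- ===== CLAIM (what is proved, stated in full; the proofs are below) =====
def Claim_equal_solution : Prop := ∀ (num_list : List Int), Dom_solution num_list → Spec_solution num_list (solution num_list)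

-- ===== LEMMAS AND PROOFS =====

def pvOdds (xs : List Int) : List Int := xs.filter (fun x => decide (PySem.Int.mod x 2 ≠ 0))
def pvEvens (xs : List Int) : List Int := xs.filter (fun x => !decide (PySem.Int.mod x 2 ≠ 0))
def pvH (c : Int) (xs : List Int) : Int := xs.foldl (fun a x => a * 10 + x) c

lemma pvH_shift (xs : List Int) (c : Int) : pvH c xs = c * 10 ^ xs.length + pvH 0 xs := by
  induction xs generalizing c with
  | nil => simp [pvH]
  | cons x xs ih =>
    show pvH (c * 10 + x) xs = c * 10 ^ (x :: xs).length + pvH (0 * 10 + x) xs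
    rw [ih (c * 10 + x), ih (0 * 10 + x), List.length_cons]
    ring

lemma pvH_cons0 (x : Int) (l : List Int) :
    pvH 0 (x :: l) = x * 10 ^ l.length + pvH 0 l := by
  show pvH (0 * 10 + x) l = x * 10 ^ l.length + pvH 0 l
  rw [pvH_shift]; ring

lemma foldrA_eq (xs : List Int) :
    xs.foldr (fun x s => solutionStepA s x) (0, 0, 1, 1) =
      (pvH 0 (pvOdds xs), pvH 0 (pvEvens xs),
        10 ^ (pvOdds xs).length, 10 ^ (pvEvens xs).length) := by
  induction xs with
  | nil => simp [pvOdds, pvEvens, pvH]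
  | cons x xs ih =>
    rw [List.foldr_cons, ih]
    by_cases h : PySem.Int.mod x 2 ≠ 0
    · have hb : (decide (PySem.Int.mod x 2 ≠ 0)) = true := decide_eq_true h
      have hx : x % 2 = 1 := by
        have h' : x % 2 ≠ 0 := by simpa using h
        omega
      have ho : pvOdds (x :: xs) = x :: pvOdds xs := by
        simp [pvOdds, hx]
      have he : pvEvens (x :: xs) = pvEvens xs := by
        simp [pvEvens, hx]
      rw [ho, he]
      simp only [solutionStepA, if_pos h]
      refine Prod.ext ?_ (Prod.ext rfl (Prod.ext ?_ rfl))
      · show pvH 0 (pvOdds xs) + x * 10 ^ (pvOdds xs).length = pvH 0 (x :: pvOdds xs)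
        rw [pvH_cons0]; ring
      · show (10 : Int) ^ (pvOdds xs).length * 10 = 10 ^ (x :: pvOdds xs).length
        rw [List.length_cons, pow_succ]
    · have hb : (decide (PySem.Int.mod x 2 ≠ 0)) = false := decide_eq_false h
      have hx : (2:Int) ∣ x := by
        have h' : x % 2 = 0 := by simpa using h
        exact Int.dvd_of_emod_eq_zero h'
      have ho : pvOdds (x :: xs) = pvOdds xs := by
        simp [pvOdds, hx]
      have he : pvEvens (x :: xs) = x :: pvEvens xs := by
        simp [pvEvens, hx]
      rw [ho, he]
      simp only [solutionStepA, if_neg h]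
      refine Prod.ext rfl (Prod.ext ?_ (Prod.ext rfl ?_))
      · show pvH 0 (pvEvens xs) + x * 10 ^ (pvEvens xs).length = pvH 0 (x :: pvEvens xs)
        rw [pvH_cons0]; ring
      · show (10 : Int) ^ (pvEvens xs).length * 10 = 10 ^ (x :: pvEvens xs).length
        rw [List.length_cons, pow_succ]

lemma foldlB_eq (xs : List Int) (a b : Int) :
    xs.foldl solutionStepB (a, b) = (pvH a (pvOdds xs), pvH b (pvEvens xs)) := by
  induction xs generalizing a b with
  | nil => simp [pvOdds, pvEvens, pvH]
  | cons x xs ih =>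
    rw [List.foldl_cons]
    by_cases h : PySem.Int.mod x 2 ≠ 0
    · have hx : x % 2 = 1 := by
        have h' : x % 2 ≠ 0 := by simpa using h
        omega
      have hnd : ¬(2:Int) ∣ x := by omega
      rw [show solutionStepB (a, b) x = (a * 10 + x, b) from by simp [solutionStepB, hnd],
          ih,
          show pvOdds (x :: xs) = x :: pvOdds xs from by
            simp [pvOdds, hx],
          show pvEvens (x :: xs) = pvEvens xs from by
            simp [pvEvens, hx]]
      rfl
    · have hx : (2:Int) ∣ x := by
        have h' : x % 2 = 0 := by simpa using h
        exact Int.dvd_of_emod_eq_zero h'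
      have h0 : x % 2 = 0 := by omega
      rw [show solutionStepB (a, b) x = (a, b * 10 + x) from by simp [solutionStepB, h0],
          ih,
          show pvEvens (x :: xs) = x :: pvEvens xs from by
            simp [pvEvens, hx],
          show pvOdds (x :: xs) = pvOdds xs from by
            simp [pvOdds, hx]]
      rfl

lemma rangeA_eq_reverse (xs : List Int) :
    PySem.List.pyRange ((xs.length : Int) - 1) (-1) (-1) =
      (PySem.List.pyRange 0 (xs.length : Int) 1).reverse := by
  rw [PySem.List.pyRange_neg_one_eq_reverse]
  norm_num

-- ===== VERDICT (by name: the statement is the Claim_ definition above) =====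
theorem solution_spec : Claim_equal_solution := by
  intro xs _
  show solution xs = solution_alt xs
  unfold solution solution_alt
  rw [rangeA_eq_reverse, List.foldl_reverse, ← PySem.List.len_eq,
      ← List.foldr_map (f := fun i => PySem.List.pyGetD xs i 0)
        (g := fun v s => solutionStepA s v),
      PySem.List.map_pyGetD_pyRange_zero, foldrA_eq, foldlB_eq]
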